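-- pv_equiv track=rewrite | github.com/lifestoryco/lab | coin/careerops/levels.py | _walk_down
-- ===== SOURCE A (Python) =====
-- _LEVEL_FALLBACK_ORDER = ["principal", "staff", "L6", "L5", "L4"]
--
-- def _walk_down(levels: dict, target: str) -> tuple[str | None, int]:
--     """If target isn't present, walk down the fallback order. Returns
--     (key_used, fallback_steps). 0 steps = target hit directly."""
--     if target in levels:
--         return target, 0
--     if target not in _LEVEL_FALLBACK_ORDER:
--         # Unknown target — try the default order from highest to lowest.
--         for i, candidate in enumerate(_LEVEL_FALLBACK_ORDER):
--             if candidate in levels: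
--                 return candidate, i + 1
--         return None, 0
--     start = _LEVEL_FALLBACK_ORDER.index(target)
--     for i, candidate in enumerate(_LEVEL_FALLBACK_ORDER[start:]):
--         if candidate in levels:
--             return candidate, i
--     return None, 0
-- ===== SOURCE B (Python) =====
-- _LEVEL_FALLBACK_ORDER = ["principal", "staff", "L6", "L5", "L4"]
--
-- def _walk_down(levels: dict, target: str) -> tuple:
--     # Inverted traversal: rank every candidate name once, then iterate over
--     # the LEVELS keys keeping the key of minimal rank (instead of scanning
--     # the candidate sequence against the dict).
--     if target in _LEVEL_FALLBACK_ORDER: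
--         start = _LEVEL_FALLBACK_ORDER.index(target)
--         rank = {c: j for j, c in enumerate(_LEVEL_FALLBACK_ORDER[start:])}
--     else:
--         rank = {c: j + 1 for j, c in enumerate(_LEVEL_FALLBACK_ORDER)}
--         rank[target] = 0
--     best = None
--     for key in levels:
--         r = rank.get(key)
--         if r is not None and (best is None or r < best[1]):
--             best = (key, r)
--     return best if best is not None else (None, 0)
-- ===== Notes on version B (the rewrite author's own statement) =====
-- stated objective: alternative
-- what changed: Inverted the traversal: instead of scanning the fallback candidate sequence against the dict (two loops with +1/+0 offsets), B precomputes a rank dict for all candidate names and makes one pass over the LEVELS keys keeping the key of minimal rank.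
import Mathlib
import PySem

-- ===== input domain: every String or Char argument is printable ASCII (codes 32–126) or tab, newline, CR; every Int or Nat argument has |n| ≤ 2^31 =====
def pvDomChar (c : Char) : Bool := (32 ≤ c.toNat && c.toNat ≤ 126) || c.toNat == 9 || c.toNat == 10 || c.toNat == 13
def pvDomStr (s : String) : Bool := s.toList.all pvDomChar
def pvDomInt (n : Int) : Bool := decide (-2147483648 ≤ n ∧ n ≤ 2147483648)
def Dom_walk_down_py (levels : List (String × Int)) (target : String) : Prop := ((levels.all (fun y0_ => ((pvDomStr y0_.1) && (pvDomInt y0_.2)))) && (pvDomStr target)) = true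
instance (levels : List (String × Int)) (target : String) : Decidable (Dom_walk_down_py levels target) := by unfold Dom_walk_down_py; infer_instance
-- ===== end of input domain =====

-- B inverts the traversal: it ranks the candidate names in a dict once and
-- takes the minimal-rank key in ONE pass over levels, instead of A's two
-- scans of the fallback order against the dict (objective: alternative).


-- ===== PORT A =====
def fallbackOrderA : List String := ["principal", "staff", "L6", "L5", "L4"]

-- "k in levels" (dict key membership)
def keyMemA (levels : List (String × Int)) (k : String) : Bool :=
  levels.any (fun p => p.1 == k)

-- first loop: for i, candidate in enumerate(order): … return candidate, i+1
def scanPlusOneA (levels : List (String × Int)) : Int → List String → Option String × Int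
  | _, [] => (none, 0)
  | i, c :: rest =>
    if keyMemA levels c then (some c, i + 1) else scanPlusOneA levels (i + 1) rest

-- second loop: for i, candidate in enumerate(order[start:]): … return candidate, i
def scanZeroA (levels : List (String × Int)) : Int → List String → Option String × Int
  | _, [] => (none, 0)
  | i, c :: rest =>
    if keyMemA levels c then (some c, i) else scanZeroA levels (i + 1) rest

def walk_down_py (levels : List (String × Int)) (target : String) : Option String × Int :=
  if keyMemA levels target then (some target, 0)
  else if ¬ (target ∈ fallbackOrderA) then
    scanPlusOneA levels 0 fallbackOrderA
  else
    -- start = order.index(target); membership guard above makes index? a some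
    let start : Int := ((PySem.List.index? fallbackOrderA target).getD 0 : Nat)
    scanZeroA levels 0 (PySem.List.slice fallbackOrderA (some start) none)

-- ===== PORT B =====
def fallbackOrderB : List String := ["principal", "staff", "L6", "L5", "L4"]

-- {c: j + off for j, c in enumerate(seq)}  (off = 0 or 1 in Source B)
def mkRankB (seq : List String) (off : Int) : PySem.Dict String Int :=
  (PySem.List.enumerate seq).foldl (fun d p => PySem.Dict.insert d p.2 (p.1 + off)) PySem.Dict.empty

-- loop body: r = rank.get(key); keep (key, r) if r is smaller than the best
def stepB (rank : PySem.Dict String Int) (best : Option (String × Int)) (p : String × Int) :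
    Option (String × Int) :=
  match PySem.Dict.get? rank p.1 with
  | none => best
  | some r =>
    match best with
    | none => some (p.1, r)
    | some b => if r < b.2 then some (p.1, r) else best

def walk_down_py_alt (levels : List (String × Int)) (target : String) : Option String × Int :=
  let rank : PySem.Dict String Int :=
    if target ∈ fallbackOrderB then
      mkRankB (PySem.List.slice fallbackOrderB
        (some (((PySem.List.index? fallbackOrderB target).getD 0 : Nat) : Int)) none) 0
    else
      PySem.Dict.insert (mkRankB fallbackOrderB 1) target 0
  match levels.foldl (stepB rank) none with
  | some b => (some b.1, b.2)
  | none => (none, 0)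

-- ===== PRECONDITION & SPEC =====
def Spec_walk_down_py (levels : List (String × Int)) (target : String) (out : Option String × Int) : Prop := out = walk_down_py_alt levels target
instance (levels : List (String × Int)) (target : String) (out : Option String × Int) : Decidable (Spec_walk_down_py levels target out) := by unfold Spec_walk_down_py; infer_instance

-- ===== CLAIM (what is proved, stated in full; the proofs are below) =====
def Claim_equal_walk_down_py : Prop := ∀ (levels : List (String × Int)) (target : String), Dom_walk_down_py levels target → Spec_walk_down_py levels target (walk_down_py levels target)

-- ===== LEMMAS AND PROOFS =====

-- minimum of two optional indices
def optMin : Option Nat → Option Nat → Option Nat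
  | none, b => b
  | some a, none => some a
  | some a, some b => some (min a b)

-- least index (into seq) of any key of levels occurring in seq
def minIdx (seq : List String) : List (String × Int) → Option Nat
  | [] => none
  | p :: lp => optMin (PySem.List.index? seq p.1) (minIdx seq lp)

-- the accumulator of B's fold, determined by the least index found so far
def bestPair (seq : List String) : Option Nat → Option (String × Int)
  | none => none
  | some j => some (seq.getD j "", (j : Int))

-- rank agrees with position in the search sequence
def rankMatches (rank : PySem.Dict String Int) (seq : List String) : Prop :=
  ∀ k, PySem.Dict.get? rank k = (PySem.List.index? seq k).map (fun j => (j : Int))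

theorem optMin_none_right (a : Option Nat) : optMin a none = a := by
  cases a <;> rfl

theorem optMin_left_comm (a b c : Option Nat) :
    optMin (optMin a b) c = optMin b (optMin a c) := by
  cases a <;> cases b <;> cases c <;> simp [optMin] <;> omega

theorem get?_of_index? {seq : List String} {k : String} {j : Nat}
    (h : PySem.List.index? seq k = some j) : seq[j]? = some k := by
  obtain ⟨hk, he, -⟩ := PySem.List.getElem_of_index?_eq_some h
  rw [List.getElem?_eq_getElem hk, he]

theorem stepB_eq (rank : PySem.Dict String Int) (seq : List String)
    (h : rankMatches rank seq) (ro : Option Nat) (p : String × Int) :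
    stepB rank (bestPair seq ro) p = bestPair seq (optMin (PySem.List.index? seq p.1) ro) := by
  unfold stepB
  rw [h p.1]
  cases hidx : PySem.List.index? seq p.1 with
  | none => cases ro <;> rfl
  | some j =>
    have hp : seq[j]? = some p.1 := get?_of_index? hidx
    cases ro with
    | none => simp [bestPair, optMin, List.getD, hp]
    | some b =>
      simp only [bestPair, optMin]
      by_cases hlt : j < b
      · simp [hlt, Nat.min_eq_left (Nat.le_of_lt hlt), List.getD, hp]
      · have : ¬ ((j : Int) < (b : Int)) := by exact_mod_cast hlt
        simp [this, Nat.min_eq_right (Nat.le_of_not_lt hlt)]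

theorem foldB_eq (rank : PySem.Dict String Int) (seq : List String)
    (h : rankMatches rank seq) (levels : List (String × Int)) :
    ∀ ro : Option Nat,
      levels.foldl (stepB rank) (bestPair seq ro) = bestPair seq (optMin ro (minIdx seq levels)) := by
  induction levels with
  | nil => intro ro; simp [minIdx, optMin_none_right]
  | cons p lp ih =>
    intro ro
    rw [List.foldl_cons, stepB_eq rank seq h, ih, minIdx, optMin_left_comm]

theorem minIdx_nil (levels : List (String × Int)) : minIdx [] levels = none := by
  induction levels with
  | nil => rfl
  | cons p lp ih => simp [minIdx, ih, PySem.List.index?_eq_idxOf?, optMin]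

theorem minIdx_cons (c : String) (rest : List String) (levels : List (String × Int)) :
    minIdx (c :: rest) levels =
      if keyMemA levels c then some 0 else (minIdx rest levels).map (· + 1) := by
  induction levels with
  | nil => simp [minIdx, keyMemA]
  | cons p lp ih =>
    by_cases hpc : p.1 = c
    · have hk : keyMemA (p :: lp) c = true := by simp [keyMemA, hpc]
      rw [minIdx, ih, hk, if_pos rfl, hpc, PySem.List.index?_cons_self]
      cases h : (if keyMemA lp c = true then some 0 else (minIdx rest lp).map (· + 1)) with
      | none => rfl
      | some b => simp [optMin]
    · have hk : keyMemA (p :: lp) c = keyMemA lp c := by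
        simp [keyMemA, fun h => hpc (by simpa using h)]
      rw [minIdx, hk, PySem.List.index?_cons_of_ne rest (Ne.symm hpc), ih]
      by_cases hl : keyMemA lp c = true
      · rw [if_pos hl, if_pos hl]
        cases PySem.List.index? rest p.1 <;> simp [optMin]
      · rw [if_neg hl, if_neg hl, minIdx]
        cases PySem.List.index? rest p.1 <;> cases minIdx rest lp <;>
          simp [optMin]

theorem scan_eq (levels : List (String × Int)) :
    ∀ (seq : List String) (i : Int),
      scanZeroA levels i seq =
        match minIdx seq levels with
        | some j => (some (seq.getD j ""), i + (j : Int))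
        | none => ((none : Option String), (0 : Int)) := by
  intro seq
  induction seq with
  | nil => intro i; rw [minIdx_nil]; rfl
  | cons c rest ih =>
    intro i
    rw [scanZeroA, minIdx_cons]
    by_cases hk : keyMemA levels c = true
    · simp [hk]
    · rw [if_neg hk, if_neg hk, ih (i + 1)]
      cases minIdx rest levels with
      | none => rfl
      | some j =>
        simp only [Option.map_some, List.getD_cons_succ, Prod.mk.injEq]
        refine ⟨by simp, by push_cast; ring⟩

theorem scan_eq_fold (levels : List (String × Int)) (seq : List String)
    (rank : PySem.Dict String Int) (h : rankMatches rank seq) :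
    scanZeroA levels 0 seq =
      (match levels.foldl (stepB rank) none with
        | some b => (some b.1, b.2)
        | none => ((none : Option String), (0 : Int))) := by
  have hf := foldB_eq rank seq h levels none
  simp only [bestPair] at hf
  rw [hf, scan_eq levels seq 0]
  cases minIdx seq levels with
  | none => rfl
  | some j => simp [optMin]

-- dict-comprehension lookup: position of the FIRST occurrence, shifted by s + off
theorem mkRank_get?_aux (off : Int) (seq : List String) :
    ∀ (s : Int) (d : PySem.Dict String Int) (k : String), seq.Nodup →
      PySem.Dict.get?
          ((PySem.List.enumerate seq s).foldl
            (fun d p => PySem.Dict.insert d p.2 (p.1 + off)) d) k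
        = match PySem.List.index? seq k with
          | some j => some (s + (j : Int) + off)
          | none => PySem.Dict.get? d k := by
  induction seq with
  | nil => intro s d k _; rfl
  | cons x xs ih =>
    intro s d k hnd
    rw [PySem.List.enumerate_cons, List.foldl_cons,
      ih (s + 1) (PySem.Dict.insert d x (s + off)) k ((List.nodup_cons.mp hnd).2)]
    by_cases hk : k = x
    · subst hk
      have hx : PySem.List.index? xs k = none :=
        (PySem.List.index?_eq_none_iff _ _).mpr (List.nodup_cons.mp hnd).1
      rw [hx, PySem.List.index?_cons_self, PySem.Dict.get?_insert_self]
      simp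
    · rw [PySem.List.index?_cons_of_ne xs (Ne.symm hk)]
      cases PySem.List.index? xs k with
      | none => simp [PySem.Dict.get?_insert_of_ne _ _ hk]
      | some j => simp only [Option.map_some]; congr 1; push_cast; ring

theorem rankMatches_mkRank (seq : List String) (hnd : seq.Nodup) :
    rankMatches (mkRankB seq 0) seq := by
  intro k
  unfold mkRankB
  rw [mkRank_get?_aux 0 seq 0 PySem.Dict.empty k hnd]
  cases PySem.List.index? seq k with
  | none => rfl
  | some j => simp

-- rank lookups for an unknown target (target prepended with rank 0)
theorem rankMatches_unknown (target : String) (hnot : target ∉ fallbackOrderB) :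
    rankMatches (PySem.Dict.insert (mkRankB fallbackOrderB 1) target 0) (target :: fallbackOrderB) := by
  intro k
  by_cases hk : k = target
  · subst hk
    rw [PySem.Dict.get?_insert_self, PySem.List.index?_cons_self]
    rfl
  · rw [PySem.Dict.get?_insert_of_ne _ _ hk, PySem.List.index?_cons_of_ne fallbackOrderB (Ne.symm hk)]
    unfold mkRankB
    rw [mkRank_get?_aux 1 fallbackOrderB 0 PySem.Dict.empty k (by decide)]
    cases PySem.List.index? fallbackOrderB k with
    | none => rfl
    | some j => simp

-- A's result is the single scan of the appropriate search sequence
theorem walkA_known (levels : List (String × Int)) (t : String) (tail : List String)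
    (h1 : t ∈ fallbackOrderA)
    (hs : PySem.List.slice fallbackOrderA
        (some (((PySem.List.index? fallbackOrderA t).getD 0 : Nat) : Int)) none = t :: tail) :
    walk_down_py levels t = scanZeroA levels 0 (t :: tail) := by
  by_cases hkm : keyMemA levels t = true
  · simp [walk_down_py, hkm, scanZeroA]
  · unfold walk_down_py
    rw [if_neg hkm, if_neg (not_not_intro h1)]
    show scanZeroA levels 0 (PySem.List.slice fallbackOrderA
      (some (((PySem.List.index? fallbackOrderA t).getD 0 : Nat) : Int)) none) = _
    rw [hs]

theorem scanPlusOne_shift (levels : List (String × Int)) (l : List String) (i : Int) :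
    scanPlusOneA levels i l = scanZeroA levels (i + 1) l := by
  induction l generalizing i with
  | nil => rfl
  | cons c rest ih => simp [scanPlusOneA, scanZeroA, ih]

theorem walkA_unknown (levels : List (String × Int)) (t : String)
    (h1 : t ∉ fallbackOrderA) :
    walk_down_py levels t = scanZeroA levels 0 (t :: fallbackOrderA) := by
  by_cases hkm : keyMemA levels t = true
  · simp [walk_down_py, hkm, scanZeroA]
  · simp [walk_down_py, hkm, h1, scanZeroA, scanPlusOne_shift]

-- ===== VERDICT (by name: the statement is the Claim_ definition above) =====
theorem walk_down_py_spec : Claim_equal_walk_down_py := by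
  intro levels target _
  unfold Spec_walk_down_py
  by_cases hmem : target ∈ fallbackOrderB
  · have hmemA : target ∈ fallbackOrderA := hmem
    unfold walk_down_py_alt
    rw [if_pos hmem]
    fin_cases hmem
    · rw [walkA_known levels "principal" ["staff", "L6", "L5", "L4"] (by decide) (by decide)]
      exact scan_eq_fold _ _ _ (by rw [show PySem.List.slice fallbackOrderB (some (((PySem.List.index? fallbackOrderB "principal").getD 0 : Nat) : Int)) none = ["principal", "staff", "L6", "L5", "L4"] from by decide]; exact rankMatches_mkRank _ (by decide))
    · rw [walkA_known levels "staff" ["L6", "L5", "L4"] (by decide) (by decide)]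
      exact scan_eq_fold _ _ _ (by rw [show PySem.List.slice fallbackOrderB (some (((PySem.List.index? fallbackOrderB "staff").getD 0 : Nat) : Int)) none = ["staff", "L6", "L5", "L4"] from by decide]; exact rankMatches_mkRank _ (by decide))
    · rw [walkA_known levels "L6" ["L5", "L4"] (by decide) (by decide)]
      exact scan_eq_fold _ _ _ (by rw [show PySem.List.slice fallbackOrderB (some (((PySem.List.index? fallbackOrderB "L6").getD 0 : Nat) : Int)) none = ["L6", "L5", "L4"] from by decide]; exact rankMatches_mkRank _ (by decide))
    · rw [walkA_known levels "L5" ["L4"] (by decide) (by decide)]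
      exact scan_eq_fold _ _ _ (by rw [show PySem.List.slice fallbackOrderB (some (((PySem.List.index? fallbackOrderB "L5").getD 0 : Nat) : Int)) none = ["L5", "L4"] from by decide]; exact rankMatches_mkRank _ (by decide))
    · rw [walkA_known levels "L4" [] (by decide) (by decide)]
      exact scan_eq_fold _ _ _ (by rw [show PySem.List.slice fallbackOrderB (some (((PySem.List.index? fallbackOrderB "L4").getD 0 : Nat) : Int)) none = ["L4"] from by decide]; exact rankMatches_mkRank _ (by decide))
  · have hmemA : target ∉ fallbackOrderA := hmem
    unfold walk_down_py_alt
    rw [if_neg hmem, walkA_unknown levels target hmemA]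
    exact scan_eq_fold _ _ _ (rankMatches_unknown target hmem)
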